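-- pv_equiv track=rewrite | github.com/nami4mo/competitive-programming-problems | practice/others/EDPC/dp_n.py | rec
-- ===== SOURCE A (Python) =====
-- INF = 10**18
--
-- def rec(l,r,dp,cumsums):
--     if l == r-1:
--         return 0
--         # dp[l][r] = cumsums[r]
--         # return dp[l][r]
--     if l > r-1:
--         return 0
--     if dp[l][r] != 0:
--         return dp[l][r]
--
--     v = cumsums[r]-cumsums[l]
--     min_v = INF
--     for i in range(l+1,r):
--         v2 = rec(l,i,dp,cumsums)+rec(i,r,dp,cumsums)
--         min_v = min(min_v,v2)
--     dp[l][r] = v+min_v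
--     return v+min_v
-- ===== SOURCE B (Python) =====
-- INF = 10**18
--
-- def rec(l, r, dp, cumsums):
--     # bottom-up interval DP over increasing lengths (no recursion, dp is not mutated;
--     # preset non-zero dp entries are honoured as cached values, like A's memo reads)
--     if r - l <= 1:
--         return 0
--     best = {}
--     for length in range(2, r - l + 1):
--         for a in range(l, r - length + 1):
--             b = a + length
--             if dp[a][b] != 0:
--                 best[(a, b)] = dp[a][b]
--             else:
--                 m = INF
--                 for i in range(a + 1, b):
--                     m = min(m, best.get((a, i), 0) + best.get((i, b), 0))
--                 best[(a, b)] = cumsums[b] - cumsums[a] + m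
--     return best[(l, r)]
-- ===== Notes on version B (the rewrite author's own statement) =====
-- stated objective: alternative
-- what changed: A's memoized top-down recursion that mutates dp in place is replaced by an iterative bottom-up interval DP over increasing interval lengths that fills a fresh table (reading preset non-zero dp entries as cached values) and never recurses or mutates dp.
-- outside the precondition, e.g. on rec(0, 2, [[0, 0, 5]], [0, 1, 2]): A returns 5, B returns 5; on rec(-1, 1, [[0, 5], [0, 0]], [1, 2]): A returns 0, B returns 0; on rec(0, 2, [[0, 0, 0]], [0, 1, 2]): A returns 2, B returns 2
import Mathlib
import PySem

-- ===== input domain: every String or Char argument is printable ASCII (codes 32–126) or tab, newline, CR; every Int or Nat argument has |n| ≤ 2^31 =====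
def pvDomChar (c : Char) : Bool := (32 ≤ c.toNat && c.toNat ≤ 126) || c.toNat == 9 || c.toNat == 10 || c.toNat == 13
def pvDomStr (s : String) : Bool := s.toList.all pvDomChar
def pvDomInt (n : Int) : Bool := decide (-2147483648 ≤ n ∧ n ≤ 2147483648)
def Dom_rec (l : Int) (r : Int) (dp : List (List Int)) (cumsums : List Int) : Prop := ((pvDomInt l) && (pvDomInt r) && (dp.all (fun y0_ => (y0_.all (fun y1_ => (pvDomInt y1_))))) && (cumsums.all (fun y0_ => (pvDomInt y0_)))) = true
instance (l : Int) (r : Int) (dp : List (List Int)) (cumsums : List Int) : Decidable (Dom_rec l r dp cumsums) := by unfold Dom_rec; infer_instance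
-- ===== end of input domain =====

-- B replaces A's memoized top-down recursion (which mutates dp in place) by an iterative
-- bottom-up interval DP filling a fresh table; objective: alternative. A mutates dp, B does
-- not: the equivalence proved here is about the RETURN value only (A's port threads the
-- mutated table through the recursion faithfully).

-- ===== PORT A =====
def pvINF : Int := 1000000000000000000

-- dp[a][b] as a read (negative indices wrap; none = IndexError)
def pvCell (dp : List (List Int)) (a b : Int) : Option Int :=
  (PySem.List.pyGet? dp a).bind (fun row => PySem.List.pyGet? row b)

-- dp[a][b] = x (no-op when out of range, which Pre_ excludes)
def pvSetCell (dp : List (List Int)) (a b : Int) (x : Int) : List (List Int) :=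
  ((PySem.List.pyGet? dp a).bind (fun row =>
    (PySem.List.pySet? row b x).bind (fun row' =>
      PySem.List.pySet? dp a row'))).getD dp

-- literal transliteration of A, threading the mutated memo table dp through the
-- recursion; fuel = interval length + 1 (each recursive call shrinks the interval)
def recA : Nat → Int → Int → List (List Int) → List Int → Int × List (List Int)
  | 0, _, _, dp, _ => (0, dp)
  | fuel+1, l, r, dp, cumsums =>
    if l = r - 1 then (0, dp)
    else if l > r - 1 then (0, dp)
    else if (pvCell dp l r).getD 0 ≠ 0 then ((pvCell dp l r).getD 0, dp)
    else
      let v := (PySem.List.pyGet? cumsums r).getD 0 - (PySem.List.pyGet? cumsums l).getD 0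
      let p := (PySem.List.pyRange (l+1) r 1).foldl
        (fun (acc : Int × List (List Int)) i =>
          (min acc.1 ((recA fuel l i acc.2 cumsums).1 +
              (recA fuel i r (recA fuel l i acc.2 cumsums).2 cumsums).1),
            (recA fuel i r (recA fuel l i acc.2 cumsums).2 cumsums).2)) (pvINF, dp)
      (v + p.1, pvSetCell p.2 l r (v + p.1))

def rec (l : Int) (r : Int) (dp : List (List Int)) (cumsums : List Int) : Int :=
  (recA ((r - l).toNat + 1) l r dp cumsums).1

-- ===== PORT B =====
-- one inner-loop step of B: fill best[(a, a+len)]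
def bStep (dp : List (List Int)) (cumsums : List Int) (len : Int)
    (best : PySem.Dict (Int × Int) Int) (a : Int) : PySem.Dict (Int × Int) Int :=
  if (pvCell dp a (a + len)).getD 0 ≠ 0 then
    best.insert (a, a + len) ((pvCell dp a (a + len)).getD 0)
  else
    best.insert (a, a + len)
      ((PySem.List.pyGet? cumsums (a + len)).getD 0 -
          (PySem.List.pyGet? cumsums a).getD 0 +
        (PySem.List.pyRange (a+1) (a + len) 1).foldl
          (fun m i => min m (best.getD (a, i) 0 + best.getD (i, a + len) 0)) pvINF)

-- bottom-up table: best[(a,b)] for all l ≤ a < b ≤ r, filled in increasing span order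
def recBTab (l r : Int) (dp : List (List Int)) (cumsums : List Int) :
    PySem.Dict (Int × Int) Int :=
  (PySem.List.pyRange 2 (r - l + 1) 1).foldl (fun best len =>
    (PySem.List.pyRange l (r - len + 1) 1).foldl (bStep dp cumsums len) best)
    PySem.Dict.empty

def rec_alt (l : Int) (r : Int) (dp : List (List Int)) (cumsums : List Int) : Int :=
  if r - l ≤ 1 then 0 else (recBTab l r dp cumsums).getD (l, r) 0

-- ===== PRECONDITION & SPEC =====
-- Pre_ excludes inputs on which Python A raises IndexError; it is conservative and also
-- excludes some inputs A returns on (negative indices that wrap, preset non-zero memo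
-- entries or short trailing rows that A happens never to read past).
def Pre_rec (l : Int) (r : Int) (dp : List (List Int)) (cumsums : List Int) : Prop :=
  r - l ≤ 1 ∨
    (0 ≤ l ∧ r < (dp.length : Int) ∧ r < (cumsums.length : Int) ∧
      ∀ i ∈ PySem.List.pyRange l r 1, r < ((dp.getD i.toNat []).length : Int))
instance (l : Int) (r : Int) (dp : List (List Int)) (cumsums : List Int) : Decidable (Pre_rec l r dp cumsums) := by unfold Pre_rec; infer_instance

def pvWitness_rec : Int × Int × List (List Int) × List Int :=
  (0, 3, [[0,0,0,0],[0,0,0,0],[0,0,0,0],[0,0,0,0]], [0,1,2,3])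

def Spec_rec (l : Int) (r : Int) (dp : List (List Int)) (cumsums : List Int) (out : Int) : Prop := out = rec_alt l r dp cumsums
instance (l : Int) (r : Int) (dp : List (List Int)) (cumsums : List Int) (out : Int) : Decidable (Spec_rec l r dp cumsums out) := by unfold Spec_rec; infer_instance

-- ===== CLAIM (what is proved, stated in full; the proofs are below) =====
def Claim_equal_rec : Prop := ∀ (l : Int) (r : Int) (dp : List (List Int)) (cumsums : List Int), Dom_rec l r dp cumsums → Pre_rec l r dp cumsums → Spec_rec l r dp cumsums (rec l r dp cumsums)

-- ===== LEMMAS AND PROOFS =====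

-- pure (memo-free, mutation-free) value of A's recursion, used as the bridge
def gF : Nat → Int → Int → List (List Int) → List Int → Int
  | 0, _, _, _, _ => 0
  | fuel+1, l, r, dp, S =>
    if l = r - 1 then 0
    else if l > r - 1 then 0
    else if (pvCell dp l r).getD 0 ≠ 0 then (pvCell dp l r).getD 0
    else
      ((PySem.List.pyGet? S r).getD 0 - (PySem.List.pyGet? S l).getD 0) +
        (PySem.List.pyRange (l+1) r 1).foldl
          (fun m i => min m (gF fuel l i dp S + gF fuel i r dp S)) pvINF

def G (l r : Int) (dp : List (List Int)) (S : List Int) : Int :=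
  gF ((r - l).toNat + 1) l r dp S

theorem gF_stable (dp : List (List Int)) (S : List Int) :
    ∀ (f1 f2 : Nat) (l r : Int), (r - l).toNat < f1 → (r - l).toNat < f2 →
      gF f1 l r dp S = gF f2 l r dp S := by
  intro f1
  induction f1 with
  | zero => intro f2 l r h1 _; omega
  | succ a ih =>
    intro f2 l r h1 h2
    match f2 with
    | 0 => omega
    | b+1 =>
      simp only [gF]
      split_ifs with hc1 hc2 hc3
      · rfl
      · rfl
      · rfl
      · congr 1
        apply PySem.List.foldl_congr_mem
        intro acc x hx
        rw [PySem.List.mem_pyRange_one] at hx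
        rw [ih b l x (by omega) (by omega), ih b x r (by omega) (by omega)]

theorem gF_eq_G (dp : List (List Int)) (S : List Int) (f : Nat) (l r : Int)
    (h : (r - l).toNat < f) : gF f l r dp S = G l r dp S :=
  gF_stable dp S f ((r - l).toNat + 1) l r h (by omega)

theorem G_base (dp : List (List Int)) (S : List Int) (l r : Int) (h : r - l ≤ 1) :
    G l r dp S = 0 := by
  unfold G
  simp only [gF]
  split_ifs with hc1 hc2
  · rfl
  · rfl
  · exact absurd (show l > r - 1 by omega) hc2
  · exact absurd (show l > r - 1 by omega) hc2

-- gF one step in the recomputation case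
theorem gF_succ_rec (dp : List (List Int)) (S : List Int) (f : Nat) (l r : Int)
    (hc1 : ¬ l = r - 1) (hc2 : ¬ l > r - 1) (hcur : (pvCell dp l r).getD 0 = 0) :
    gF (f+1) l r dp S =
      ((PySem.List.pyGet? S r).getD 0 - (PySem.List.pyGet? S l).getD 0) +
        (PySem.List.pyRange (l+1) r 1).foldl
          (fun m i => min m (gF f l i dp S + gF f i r dp S)) pvINF := by
  simp only [gF]
  rw [if_neg hc1, if_neg hc2, if_neg (not_not_intro hcur)]

-- the memo-table invariant: every cell is either untouched or holds its own pure
-- value, written over an original 0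
def InvA (dp0 d : List (List Int)) (S : List Int) : Prop :=
  ∀ a b : Int, 0 ≤ a → 0 ≤ b →
    pvCell d a b = pvCell dp0 a b ∨
      (pvCell dp0 a b = some 0 ∧ pvCell d a b = some (G a b dp0 S))

theorem pvSetCell_of_none (dp : List (List Int)) (a b x : Int)
    (h : pvCell dp a b = none) : pvSetCell dp a b x = dp := by
  unfold pvCell at h
  unfold pvSetCell
  cases hg : PySem.List.pyGet? dp a with
  | none => simp
  | some row =>
    rw [hg] at h
    simp only [Option.bind_some] at h ⊢
    have hnone : PySem.List.pySet? row b x = none := by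
      rw [PySem.List.pySet?_eq_none_iff]
      rw [PySem.List.pyGet?_eq_none_iff] at h
      exact h
    rw [hnone]
    simp

theorem pvCell_setCell (dp : List (List Int)) (a b x p q : Int)
    (ha : 0 ≤ a) (hb : 0 ≤ b) (hp : 0 ≤ p) (hq : 0 ≤ q)
    (hsome : (pvCell dp a b).isSome) :
    pvCell (pvSetCell dp a b x) p q =
      if p = a ∧ q = b then some x else pvCell dp p q := by
  unfold pvCell at hsome ⊢
  unfold pvSetCell
  cases hg : PySem.List.pyGet? dp a with
  | none => rw [hg] at hsome; simp at hsome
  | some row =>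
    rw [hg] at hsome
    simp only [Option.bind_some] at hsome ⊢
    obtain ⟨y, hy⟩ : ∃ y, PySem.List.pyGet? row b = some y :=
      Option.isSome_iff_exists.mp hsome
    have hbr : b.toNat < row.length := by
      by_contra hcon
      rw [PySem.List.pyGet?_of_nonneg row hb, List.getElem?_eq_none (by omega)] at hy
      simp at hy
    have har : a.toNat < dp.length := by
      by_contra hcon
      rw [PySem.List.pyGet?_of_nonneg dp ha, List.getElem?_eq_none (by omega)] at hg
      simp at hg
    have hset : PySem.List.pySet? row b x = some (row.set b.toNat x) := by
      have hcast : ((b.toNat : Nat) : Int) = b := by omega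
      rw [← hcast, PySem.List.pySet?_natCast row b.toNat x hbr, Int.toNat_natCast]
    have hset2 : PySem.List.pySet? dp a (row.set b.toNat x) =
        some (dp.set a.toNat (row.set b.toNat x)) := by
      have hcast : ((a.toNat : Nat) : Int) = a := by omega
      rw [← hcast, PySem.List.pySet?_natCast dp a.toNat _ har, Int.toNat_natCast]
    rw [hset]
    simp only [Option.bind_some]
    rw [hset2]
    simp only [Option.getD_some]
    rw [PySem.List.pyGet?_of_nonneg (dp.set a.toNat (row.set b.toNat x)) hp,
      PySem.List.pyGet?_of_nonneg dp hp]
    rw [List.getElem?_set]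
    by_cases hpa : p = a
    · rw [if_pos (show a.toNat = p.toNat by omega), if_pos har]
      simp only [Option.bind_some]
      have hrow : dp[p.toNat]? = some row := by
        rw [show p.toNat = a.toNat by omega, ← PySem.List.pyGet?_of_nonneg dp ha, hg]
      rw [hrow]
      simp only [Option.bind_some]
      rw [PySem.List.pyGet?_of_nonneg (row.set b.toNat x) hq,
        PySem.List.pyGet?_of_nonneg row hq]
      rw [List.getElem?_set]
      by_cases hqb : q = b
      · rw [if_pos (show b.toNat = q.toNat by omega), if_pos hbr,
          if_pos (And.intro hpa hqb)]
      · rw [if_neg (show ¬ b.toNat = q.toNat by omega),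
          if_neg (fun hh => hqb hh.2)]
    · rw [if_neg (show ¬ a.toNat = p.toNat by omega),
        if_neg (fun hh => hpa hh.1)]

theorem InvA_write (dp0 d : List (List Int)) (S : List Int) (l r : Int)
    (hl : 0 ≤ l) (hr : 0 ≤ r) (hinv : InvA dp0 d S)
    (hdp0 : pvCell dp0 l r = none ∨ pvCell dp0 l r = some 0) :
    InvA dp0 (pvSetCell d l r (G l r dp0 S)) S := by
  rcases hdp0 with hnone | hzero
  · have hdnone : pvCell d l r = none := by
      rcases hinv l r hl hr with hsame | ⟨h0, _⟩
      · rw [hsame, hnone]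
      · rw [h0] at hnone; simp at hnone
    rw [pvSetCell_of_none d l r _ hdnone]
    exact hinv
  · have hdsome : (pvCell d l r).isSome := by
      rcases hinv l r hl hr with hsame | ⟨_, hG⟩
      · rw [hsame, hzero]; rfl
      · rw [hG]; rfl
    intro p q hp hq
    rw [pvCell_setCell d l r _ p q hl hr hp hq hdsome]
    by_cases hpq : p = l ∧ q = r
    · rw [if_pos hpq]
      right
      refine ⟨?_, by rw [hpq.1, hpq.2]⟩
      rw [hpq.1, hpq.2]; exact hzero
    · rw [if_neg hpq]
      exact hinv p q hp hq

-- A's loop: threading the memo table keeps the invariant and computes gF's fold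
theorem foldA_eq (dp0 : List (List Int)) (S : List Int) (fuel : Nat) (l r : Int)
    (HIH : ∀ (l' r' : Int) (d' : List (List Int)), 0 ≤ l' → (r' - l').toNat < fuel →
      InvA dp0 d' S →
      (recA fuel l' r' d' S).1 = gF fuel l' r' dp0 S ∧
        InvA dp0 (recA fuel l' r' d' S).2 S)
    (hl : 0 ≤ l) :
    ∀ (lst : List Int), (∀ i ∈ lst, l < i ∧ i < r ∧ (r - l).toNat ≤ fuel) →
      ∀ (d : List (List Int)) (m : Int), InvA dp0 d S →
        (lst.foldl (fun (acc : Int × List (List Int)) i =>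
            (min acc.1 ((recA fuel l i acc.2 S).1 +
                (recA fuel i r (recA fuel l i acc.2 S).2 S).1),
              (recA fuel i r (recA fuel l i acc.2 S).2 S).2)) (m, d)).1 =
          lst.foldl (fun m i => min m (gF fuel l i dp0 S + gF fuel i r dp0 S)) m ∧
        InvA dp0 (lst.foldl (fun (acc : Int × List (List Int)) i =>
            (min acc.1 ((recA fuel l i acc.2 S).1 +
                (recA fuel i r (recA fuel l i acc.2 S).2 S).1),
              (recA fuel i r (recA fuel l i acc.2 S).2 S).2)) (m, d)).2 S := by
  intro lst
  induction lst with
  | nil => intro _ d m hinv; exact ⟨rfl, hinv⟩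
  | cons i tl ih =>
    intro hmem d m hinv
    have hi := hmem i List.mem_cons_self
    have h1 := HIH l i d hl (by omega) hinv
    have h2 := HIH i r (recA fuel l i d S).2 (by omega) (by omega) h1.2
    simp only [List.foldl_cons]
    rw [← h1.1, ← h2.1]
    exact ih (fun j hj => hmem j (List.mem_cons_of_mem _ hj))
      (recA fuel i r (recA fuel l i d S).2 S).2
      (min m ((recA fuel l i d S).1 + (recA fuel i r (recA fuel l i d S).2 S).1)) h2.2

theorem recA_eq (dp0 : List (List Int)) (S : List Int) :
    ∀ (fuel : Nat) (l r : Int) (d : List (List Int)), 0 ≤ l → (r - l).toNat < fuel →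
      InvA dp0 d S →
      (recA fuel l r d S).1 = gF fuel l r dp0 S ∧ InvA dp0 (recA fuel l r d S).2 S := by
  intro fuel
  induction fuel with
  | zero => intro l r d _ h _; omega
  | succ f ih =>
    intro l r d hl hfuel hinv
    by_cases hc1 : l = r - 1
    · constructor
      · simp [recA, gF, hc1]
      · simp only [recA, if_pos hc1]; exact hinv
    by_cases hc2 : l > r - 1
    · constructor
      · simp [recA, gF, hc1, hc2]
      · simp only [recA, if_neg hc1, if_pos hc2]; exact hinv
    -- l < r - 1
    have hr : 0 ≤ r := by omega
    have hGv : gF (f+1) l r dp0 S = G l r dp0 S := gF_eq_G dp0 S (f+1) l r hfuel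
    have hfold := foldA_eq dp0 S f l r ih hl (PySem.List.pyRange (l+1) r 1)
      (by intro i hi; rw [PySem.List.mem_pyRange_one] at hi
          exact ⟨by omega, by omega, by omega⟩)
    have hcell := hinv l r hl hr
    by_cases hcurd : (pvCell d l r).getD 0 ≠ 0
    · -- memo hit in d
      have hstep : recA (f+1) l r d S = ((pvCell d l r).getD 0, d) := by
        simp only [recA, if_neg hc1, if_neg hc2, if_pos hcurd]
      rw [hstep]
      refine ⟨?_, hinv⟩
      rcases hcell with hsame | ⟨h0, hG⟩
      · simp only [gF, if_neg hc1, if_neg hc2]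
        rw [← hsame, if_pos hcurd]
      · simp only [hG, Option.getD_some]
        exact hGv.symm
    · -- recompute: both take the fold path
      have hcurd' : (pvCell d l r).getD 0 = 0 := not_not.mp hcurd
      have hcur0 : (pvCell dp0 l r).getD 0 = 0 := by
        rcases hcell with hsame | ⟨h0, _⟩
        · rw [← hsame]; exact hcurd'
        · rw [h0]; rfl
      have hdp0opt : pvCell dp0 l r = none ∨ pvCell dp0 l r = some 0 := by
        cases hx : pvCell dp0 l r with
        | none => exact Or.inl rfl
        | some y =>
          right
          rw [hx] at hcur0
          simp only [Option.getD_some] at hcur0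
          rw [hcur0]
      have hf := hfold d pvINF hinv
      have hgfe := gF_succ_rec dp0 S f l r hc1 hc2 hcur0
      constructor
      · simp only [recA, if_neg hc1, if_neg hc2, if_neg hcurd]
        rw [hf.1, hgfe]
      · simp only [recA, if_neg hc1, if_neg hc2, if_neg hcurd]
        rw [hf.1]
        have hWv : (PySem.List.pyGet? S r).getD 0 - (PySem.List.pyGet? S l).getD 0 +
            (PySem.List.pyRange (l+1) r 1).foldl
              (fun m i => min m (gF f l i dp0 S + gF f i r dp0 S)) pvINF =
            G l r dp0 S := by
          rw [← hgfe]; exact hGv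
        rw [hWv]
        exact InvA_write dp0 _ S l r hl hr hf.2 hdp0opt

theorem InvA_refl (dp0 : List (List Int)) (S : List Int) : InvA dp0 dp0 S := by
  intro a b _ _; exact Or.inl rfl

theorem rec_base (l r : Int) (dp : List (List Int)) (S : List Int) (h : r - l ≤ 1) :
    rec l r dp S = 0 := by
  unfold rec
  simp only [recA]
  split_ifs with hc1 hc2
  · rfl
  · rfl
  · exact absurd (show l > r - 1 by omega) hc2
  · exact absurd (show l > r - 1 by omega) hc2

theorem rec_eq_G (l r : Int) (dp : List (List Int)) (S : List Int)
    (hl : 0 ≤ l) : rec l r dp S = G l r dp S := by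
  unfold rec
  rw [(recA_eq dp S ((r - l).toNat + 1) l r dp hl (by omega) (InvA_refl dp S)).1]
  exact gF_eq_G dp S ((r - l).toNat + 1) l r (by omega)

-- ===== B side: the bottom-up table computes G =====

-- table invariant: all pairs of span < len, plus span = len strictly left of a, are done
def TabOK (dp : List (List Int)) (S : List Int) (l r len a : Int)
    (t : PySem.Dict (Int × Int) Int) : Prop :=
  (∀ p q : Int, l ≤ p → q ≤ r → 2 ≤ q - p →
      (q - p < len ∨ (q - p = len ∧ p < a)) → t.getD (p, q) 0 = G p q dp S) ∧
  (∀ p q : Int, q - p < 2 → t.getD (p, q) 0 = 0)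

theorem bStep_eq (dp : List (List Int)) (S : List Int) (l r len a : Int)
    (hla : l ≤ a) (har : a ≤ r - len) (hlen : 2 ≤ len)
    (t : PySem.Dict (Int × Int) Int) (ht : TabOK dp S l r len a t) :
    bStep dp S len t a = t.insert (a, a + len) (G a (a + len) dp S) := by
  unfold bStep
  split_ifs with hc
  · congr 1
    unfold G
    simp only [gF]
    rw [if_neg (show ¬ a = a + len - 1 by omega),
      if_neg (show ¬ a > a + len - 1 by omega), if_pos hc]
  · congr 1
    have hc' : (pvCell dp a (a + len)).getD 0 = 0 := not_not.mp hc
    unfold G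
    rw [show (a + len - a).toNat + 1 = len.toNat + 1 by omega]
    rw [gF_succ_rec dp S len.toNat a (a + len)
      (show ¬ a = a + len - 1 by omega) (show ¬ a > a + len - 1 by omega) hc']
    congr 1
    apply PySem.List.foldl_congr_mem
    intro acc i hi
    rw [PySem.List.mem_pyRange_one] at hi
    have h1 : t.getD (a, i) 0 = gF len.toNat a i dp S := by
      by_cases hspan : 2 ≤ i - a
      · rw [ht.1 a i hla (by omega) hspan (Or.inl (by omega))]
        rw [gF_eq_G dp S len.toNat a i (by omega)]
      · rw [ht.2 a i (by omega)]
        rw [gF_eq_G dp S len.toNat a i (by omega), G_base dp S a i (by omega)]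
    have h2 : t.getD (i, a + len) 0 = gF len.toNat i (a + len) dp S := by
      by_cases hspan : 2 ≤ a + len - i
      · rw [ht.1 i (a + len) (by omega) (by omega) hspan (Or.inl (by omega))]
        rw [gF_eq_G dp S len.toNat i (a + len) (by omega)]
      · rw [ht.2 i (a + len) (by omega)]
        rw [gF_eq_G dp S len.toNat i (a + len) (by omega),
          G_base dp S i (a + len) (by omega)]
    rw [h1, h2]

theorem tab_step (dp : List (List Int)) (S : List Int) (l r len a : Int)
    (hla : l ≤ a) (har : a ≤ r - len) (hlen : 2 ≤ len)
    (t : PySem.Dict (Int × Int) Int) (ht : TabOK dp S l r len a t) :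
    TabOK dp S l r len (a+1) (bStep dp S len t a) := by
  rw [bStep_eq dp S l r len a hla har hlen t ht]
  constructor
  · intro p q hp hq hspan hcond
    rw [PySem.Dict.getD_insert]
    by_cases hkey : ((p, q) : Int × Int) = (a, a + len)
    · have hpa : p = a := congrArg Prod.fst hkey
      have hqb : q = a + len := congrArg Prod.snd hkey
      rw [if_pos hkey, hpa, hqb]
    · rw [if_neg hkey]
      apply ht.1 p q hp hq hspan
      rcases hcond with hlt | ⟨heq, hpa⟩
      · exact Or.inl hlt
      · rcases lt_or_ge p a with h' | h'
        · exact Or.inr ⟨heq, h'⟩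
        · exact absurd (by
            rw [show p = a by omega, show q = a + len by omega]) hkey
  · intro p q hspan
    rw [PySem.Dict.getD_insert]
    have hne : ((p, q) : Int × Int) ≠ (a, a + len) := by
      intro hpq
      have hpa : p = a := congrArg Prod.fst hpq
      have hqb : q = a + len := congrArg Prod.snd hpq
      omega
    rw [if_neg hne]
    exact ht.2 p q hspan

theorem tab_inner (dp : List (List Int)) (S : List Int) (l r len : Int)
    (hlen : 2 ≤ len) :
    ∀ (n : Nat) (a : Int) (t : PySem.Dict (Int × Int) Int), l ≤ a →
      (r - len + 1 - a).toNat ≤ n → TabOK dp S l r len a t →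
      TabOK dp S l r len (r - len + 1)
        ((PySem.List.pyRange a (r - len + 1) 1).foldl (bStep dp S len) t) := by
  intro n
  induction n with
  | zero =>
    intro a t hla hn ht
    rw [PySem.List.pyRange_one_eq_nil (by omega)]
    refine ⟨fun p q hp hq hs hc => ht.1 p q hp hq hs ?_, ht.2⟩
    rcases hc with hh | ⟨he, hpa⟩
    · exact Or.inl hh
    · exact Or.inr ⟨he, by omega⟩
  | succ k ih =>
    intro a t hla hn ht
    by_cases hend : r - len + 1 ≤ a
    · rw [PySem.List.pyRange_one_eq_nil hend]
      refine ⟨fun p q hp hq hs hc => ht.1 p q hp hq hs ?_, ht.2⟩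
      rcases hc with hh | ⟨he, hpa⟩
      · exact Or.inl hh
      · exact Or.inr ⟨he, by omega⟩
    · rw [PySem.List.pyRange_one_cons (by omega)]
      simp only [List.foldl_cons]
      exact ih (a+1) _ (by omega) (by omega)
        (tab_step dp S l r len a hla (by omega) hlen t ht)

theorem tab_to_next (dp : List (List Int)) (S : List Int) (l r len : Int)
    (t : PySem.Dict (Int × Int) Int) (h : TabOK dp S l r len (r - len + 1) t) :
    TabOK dp S l r (len + 1) l t := by
  refine ⟨fun p q hp hq hs hc => h.1 p q hp hq hs ?_, h.2⟩
  rcases hc with hlt | ⟨heq, _⟩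
  · by_cases hql : q - p < len
    · exact Or.inl hql
    · exact Or.inr ⟨by omega, by omega⟩
  · omega

theorem tab_outer (dp : List (List Int)) (S : List Int) (l r : Int) :
    ∀ (n : Nat) (len : Int) (t : PySem.Dict (Int × Int) Int), 2 ≤ len →
      (r - l + 1 - len).toNat ≤ n → TabOK dp S l r len l t →
      TabOK dp S l r (r - l + 1) l
        ((PySem.List.pyRange len (r - l + 1) 1).foldl (fun best len' =>
          (PySem.List.pyRange l (r - len' + 1) 1).foldl (bStep dp S len') best) t) := by
  intro n
  induction n with
  | zero =>
    intro len t hlen hn ht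
    rw [PySem.List.pyRange_one_eq_nil (by omega)]
    refine ⟨fun p q hp hq hs hc => ht.1 p q hp hq hs ?_, ht.2⟩
    rcases hc with hlt | ⟨_, hpl⟩
    · exact Or.inl (by omega)
    · omega
  | succ k ih =>
    intro len t hlen hn ht
    by_cases hend : r - l + 1 ≤ len
    · rw [PySem.List.pyRange_one_eq_nil hend]
      refine ⟨fun p q hp hq hs hc => ht.1 p q hp hq hs ?_, ht.2⟩
      rcases hc with hlt | ⟨_, hpl⟩
      · exact Or.inl (by omega)
      · omega
    · rw [PySem.List.pyRange_one_cons (by omega)]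
      simp only [List.foldl_cons]
      exact ih (len + 1) _ (by omega) (by omega)
        (tab_to_next dp S l r len _
          (tab_inner dp S l r len hlen (r - len + 1 - l).toNat l t (le_refl l)
            (by omega) ht))

theorem rec_alt_eq_G (l r : Int) (dp : List (List Int)) (S : List Int)
    (h2 : 2 ≤ r - l) : rec_alt l r dp S = G l r dp S := by
  unfold rec_alt
  rw [if_neg (by omega)]
  have hstart : TabOK dp S l r 2 l PySem.Dict.empty := by
    constructor
    · intro p q hp hq hs hc
      rcases hc with hlt | ⟨_, hpl⟩
      · omega
      · omega
    · intro p q _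
      exact PySem.Dict.getD_empty _ _
  have hfinal := tab_outer dp S l r (r - l + 1 - 2).toNat 2 PySem.Dict.empty
    (le_refl 2) (by omega) hstart
  unfold recBTab
  rw [hfinal.1 l r (le_refl l) (le_refl r) h2 (Or.inl (by omega))]

theorem rec_alt_base (l r : Int) (dp : List (List Int)) (S : List Int)
    (h : r - l ≤ 1) : rec_alt l r dp S = 0 := by
  unfold rec_alt
  rw [if_pos h]

-- ===== VERDICT (by name: the statement is the Claim_ definition above) =====
theorem rec_spec : Claim_equal_rec := by
  intro l r dp cumsums _ hpre
  unfold Spec_rec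
  by_cases h : r - l ≤ 1
  · rw [rec_base l r dp cumsums h, rec_alt_base l r dp cumsums h]
  · have hl : 0 ≤ l := by
      rcases hpre with hpre | hpre
      · omega
      · exact hpre.1
    rw [rec_eq_G l r dp cumsums hl, rec_alt_eq_G l r dp cumsums (by omega)]
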